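-- pv_equiv track=rewrite | github.com/dlewissandy/teaparty | teaparty_app/services/team_output_parser.py | _resolve_agent_id
-- ===== SOURCE A (Python) =====
-- def _resolve_agent_id(hint: str, slug_to_id: dict[str, str]) -> str | None:
--     """Try to match a sub-agent hint to a known agent ID."""
--     if not hint:
--         return None
--     # Direct slug match.
--     if hint in slug_to_id:
--         return slug_to_id[hint]
--     # Case-insensitive / normalized match.
--     hint_lower = hint.lower().strip()
--     for slug, aid in slug_to_id.items():
--         if slug.lower() == hint_lower:
--             return aid
--     # Partial match: hint may be a description like "research specialist".
--     # Try matching against slug substrings.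
--     for slug, aid in slug_to_id.items():
--         if slug.lower() in hint_lower or hint_lower in slug.lower():
--             return aid
--     return None
-- ===== SOURCE B (Python) =====
-- def _resolve_agent_id(hint: str, slug_to_id: dict[str, str]) -> str | None:
--     """Single pass: classify each slug once, resolve precedence afterwards."""
--     if not hint:
--         return None
--     hint_lower = hint.lower().strip()
--     exact = case = partial = None
--     for slug, aid in slug_to_id.items():
--         slug_lower = slug.lower()
--         if exact is None and slug == hint:
--             exact = aid
--         if case is None and slug_lower == hint_lower:
--             case = aid
--         if partial is None and (slug_lower in hint_lower or hint_lower in slug_lower):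
--             partial = aid
--     if exact is not None:
--         return exact
--     if case is not None:
--         return case
--     return partial
-- ===== Notes on version B (the rewrite author's own statement) =====
-- stated objective: alternative
-- what changed: Replaces A's dict lookup plus two separate precedence-ordered scans over the items with a single pass that records the first exact, first case-insensitive and first partial match in three option holders and resolves the precedence once after the loop.
import Mathlib
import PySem

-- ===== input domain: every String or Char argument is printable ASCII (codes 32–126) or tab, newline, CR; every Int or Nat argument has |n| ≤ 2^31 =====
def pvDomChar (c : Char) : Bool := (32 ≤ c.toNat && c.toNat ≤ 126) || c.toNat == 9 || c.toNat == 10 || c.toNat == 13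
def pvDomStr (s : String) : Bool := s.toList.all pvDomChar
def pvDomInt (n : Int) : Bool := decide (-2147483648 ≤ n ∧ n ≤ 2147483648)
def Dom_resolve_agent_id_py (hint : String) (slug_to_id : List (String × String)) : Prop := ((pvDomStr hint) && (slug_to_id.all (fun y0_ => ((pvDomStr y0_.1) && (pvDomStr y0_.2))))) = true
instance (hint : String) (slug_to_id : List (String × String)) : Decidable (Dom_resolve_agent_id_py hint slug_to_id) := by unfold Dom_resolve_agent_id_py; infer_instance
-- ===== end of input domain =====

-- B replaces A's three precedence-ordered scans by a single pass keeping three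
-- optional first-match holders (exact / case-insensitive / partial) and resolves
-- the precedence after the loop; same results, different decomposition.


-- ===== PORT A =====
-- literal transliteration of A: empty-hint guard, dict lookup, then two
-- first-match scans (a Python first-match `for` loop is List.find?).
def resolve_agent_id_py (hint : String) (slug_to_id : List (String × String)) : Option String :=
  if hint = "" then none
  else
    let d := PySem.Dict.ofList slug_to_id
    match d.get? hint with
    | some aid => some aid
    | none =>
      let hint_lower := PySem.Str.strip (PySem.Str.lower hint)
      match d.items.find? (fun kv => PySem.Str.lower kv.1 == hint_lower) with
      | some kv => some kv.2
      | none =>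
        match d.items.find? (fun kv =>
            PySem.Str.isIn (PySem.Str.lower kv.1) hint_lower ||
            PySem.Str.isIn hint_lower (PySem.Str.lower kv.1)) with
        | some kv => some kv.2
        | none => none

-- ===== PORT B =====
-- literal transliteration of Source B: one fold over the items carrying the three
-- optional holders, precedence resolved after the loop.
def resolve_agent_id_py_alt (hint : String) (slug_to_id : List (String × String)) : Option String :=
  if hint = "" then none
  else
    let d := PySem.Dict.ofList slug_to_id
    let hint_lower := PySem.Str.strip (PySem.Str.lower hint)
    let r := d.items.foldl
      (fun (acc : Option String × Option String × Option String) kv =>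
        let slug_lower := PySem.Str.lower kv.1
        let e := if acc.1.isNone && kv.1 == hint then some kv.2 else acc.1
        let c := if acc.2.1.isNone && slug_lower == hint_lower then some kv.2 else acc.2.1
        let p := if acc.2.2.isNone &&
            (PySem.Str.isIn slug_lower hint_lower || PySem.Str.isIn hint_lower slug_lower)
          then some kv.2 else acc.2.2
        (e, c, p))
      (none, none, none)
    match r.1 with
    | some e => some e
    | none =>
      match r.2.1 with
      | some c => some c
      | none => r.2.2

-- ===== PRECONDITION & SPEC =====
def Spec_resolve_agent_id_py (hint : String) (slug_to_id : List (String × String)) (out : Option String) : Prop := out = resolve_agent_id_py_alt hint slug_to_id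
instance (hint : String) (slug_to_id : List (String × String)) (out : Option String) : Decidable (Spec_resolve_agent_id_py hint slug_to_id out) := by unfold Spec_resolve_agent_id_py; infer_instance

-- ===== CLAIM (what is proved, stated in full; the proofs are below) =====
def Claim_equal_resolve_agent_id_py : Prop := ∀ (hint : String) (slug_to_id : List (String × String)), Dom_resolve_agent_id_py hint slug_to_id → Spec_resolve_agent_id_py hint slug_to_id (resolve_agent_id_py hint slug_to_id)

-- ===== LEMMAS AND PROOFS =====

-- B's fold computes the first match of each of the three predicates.
theorem foldl_three_first_matches (l : List (String × String))
    (p1 p2 p3 : String × String → Bool)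
    (a b c : Option String) :
    l.foldl
      (fun (acc : Option String × Option String × Option String) kv =>
        ((if acc.1.isNone && p1 kv then some kv.2 else acc.1),
         (if acc.2.1.isNone && p2 kv then some kv.2 else acc.2.1),
         (if acc.2.2.isNone && p3 kv then some kv.2 else acc.2.2)))
      (a, b, c)
    = (a.orElse (fun _ => (l.find? p1).map Prod.snd),
       b.orElse (fun _ => (l.find? p2).map Prod.snd),
       c.orElse (fun _ => (l.find? p3).map Prod.snd)) := by
  induction l generalizing a b c with
  | nil => cases a <;> cases b <;> cases c <;> simp [Option.orElse]
  | cons x xs ih =>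
    simp only [List.foldl_cons, ih, List.find?]
    cases a <;> cases b <;> cases c <;>
      cases h1 : p1 x <;> cases h2 : p2 x <;> cases h3 : p3 x <;>
      simp [Option.orElse]

-- dict lookup is the first match on the items list.
theorem get?_eq_find? (l : List (String × String)) (x : String) :
    (PySem.Dict.mk l).get? x
      = (l.find? (fun kv => kv.1 == x)).map Prod.snd := by
  induction l with
  | nil => simp [PySem.Dict.get?]
  | cons kv rest ih =>
    rw [PySem.Dict.get?_mk_cons, List.find?]
    by_cases h : kv.1 = x
    · simp [h]
    · rw [show (kv.1 == x) = false from beq_eq_false_iff_ne.mpr h]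
      simpa using ih

-- ===== VERDICT (by name: the statement is the Claim_ definition above) =====
theorem resolve_agent_id_py_spec : Claim_equal_resolve_agent_id_py := by
  intro hint slug_to_id _
  unfold Spec_resolve_agent_id_py resolve_agent_id_py resolve_agent_id_py_alt
  by_cases h0 : hint = ""
  · simp [h0]
  · simp only [h0, if_false]
    rw [foldl_three_first_matches]
    have hd : PySem.Dict.ofList slug_to_id
        = PySem.Dict.mk (PySem.Dict.ofList slug_to_id).items := by
      apply PySem.Dict.ext; rfl
    rw [hd, get?_eq_find?]
    set l := (PySem.Dict.mk (PySem.Dict.ofList slug_to_id).items).items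
    cases h1 : l.find? (fun kv => kv.1 == hint) <;>
      cases h2 : l.find? (fun kv => PySem.Str.lower kv.1 == PySem.Str.strip (PySem.Str.lower hint)) <;>
      cases h3 : l.find? (fun kv =>
          PySem.Str.isIn (PySem.Str.lower kv.1) (PySem.Str.strip (PySem.Str.lower hint)) ||
          PySem.Str.isIn (PySem.Str.strip (PySem.Str.lower hint)) (PySem.Str.lower kv.1)) <;>
      simp [Option.orElse]
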